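-- pv_equiv track=rewrite | github.com/samuel-aka-viana/sdd-pipeline | skills/evidence_builder.py | _split_tool_blocks
-- ===== SOURCE A (Python) =====
-- def _split_tool_blocks(research: str) -> dict[str, str]:
--     """Split '# Tool\\ncontent\\n\\n# Tool2\\ncontent' into {tool: content}."""
--     blocks: dict[str, str] = {}
--     current_tool = "_default"
--     current_lines: list[str] = []
--     for line in research.splitlines():
--         if line.startswith("# "):
--             if current_lines:
--                 blocks[current_tool] = "\n".join(current_lines)
--             current_tool = line[2:].strip().lower()
--             current_lines = []
--         else:
--             current_lines.append(line)
--     if current_lines: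
--         blocks[current_tool] = "\n".join(current_lines)
--     return blocks
-- ===== SOURCE B (Python) =====
-- def _split_tool_blocks(research: str) -> dict[str, str]:
--     """Split '# Tool\ncontent\n\n# Tool2\ncontent' into {tool: content}."""
--     blocks: dict[str, str] = {}
--     for key, seg in _segments("_default", research.splitlines()):
--         if seg:
--             blocks[key] = "\n".join(seg)
--     return blocks
--
--
-- def _segments(key, lines):
--     """Recursively cut lines at the first '# ' header into (key, body) segments."""
--     for i, ln in enumerate(lines):
--         if ln.startswith("# "):
--             return [(key, lines[:i])] + _segments(ln[2:].strip().lower(), lines[i + 1:])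
--     return [(key, lines)]
-- ===== Notes on version B (the rewrite author's own statement) =====
-- stated objective: alternative
-- what changed: B first cuts the line list recursively into (key, body) segments at '# ' headers, then builds the dict in one separate insertion pass over the segments, instead of A's single loop that interleaves accumulation and flushing with mutable current_tool/current_lines state.
import Mathlib
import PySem

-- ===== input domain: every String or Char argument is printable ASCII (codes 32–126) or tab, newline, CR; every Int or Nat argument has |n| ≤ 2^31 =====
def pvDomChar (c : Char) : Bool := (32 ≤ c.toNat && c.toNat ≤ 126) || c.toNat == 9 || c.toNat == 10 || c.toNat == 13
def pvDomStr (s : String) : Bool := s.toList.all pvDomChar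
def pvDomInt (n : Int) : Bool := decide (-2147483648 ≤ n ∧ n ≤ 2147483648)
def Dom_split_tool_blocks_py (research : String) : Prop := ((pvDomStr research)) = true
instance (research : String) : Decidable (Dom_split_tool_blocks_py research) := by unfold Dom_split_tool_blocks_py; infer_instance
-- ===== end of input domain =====

-- B replaces A's single accumulating loop (mutable current_tool/current_lines flushed at each header)
-- by a recursive segmentation of the line list at '# ' headers followed by one separate insertion pass
-- over the segments; an alternative decomposition of the same cost.

-- ===== PORT A =====
-- the body of A's for-loop, on state (blocks, current_tool, current_lines)
def pvStepA (st : PySem.Dict String String × String × List String) (line : String) :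
    PySem.Dict String String × String × List String :=
  if PySem.Str.startswith line "# " then
    ((if st.2.2 ≠ [] then st.1.insert st.2.1 (PySem.Str.join "\n" st.2.2) else st.1),
     PySem.Str.lower (PySem.Str.strip (PySem.Str.slice line (some 2) none)),
     ([] : List String))
  else (st.1, st.2.1, st.2.2 ++ [line])

def split_tool_blocks_py (research : String) : List (String × String) :=
  let st := (PySem.Str.splitlines research).foldl pvStepA
    ((PySem.Dict.empty : PySem.Dict String String), "_default", ([] : List String))
  (if st.2.2 ≠ [] then st.1.insert st.2.1 (PySem.Str.join "\n" st.2.2) else st.1).items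

-- ===== PORT B =====
-- _segments: the Python loop returns at the FIRST header line, which is the takeWhile/dropWhile
-- split of `lines` at the first line starting with '# '
def pvSegments (key : String) (lines : List String) : List (String × List String) :=
  match _h : lines.dropWhile (fun l => !(PySem.Str.startswith l "# ")) with
  | [] => [(key, lines)]
  | hd :: rest =>
      (key, lines.takeWhile (fun l => !(PySem.Str.startswith l "# "))) ::
        pvSegments (PySem.Str.lower (PySem.Str.strip (PySem.Str.slice hd (some 2) none))) rest
termination_by lines.length
decreasing_by
  have := List.length_dropWhile_le (fun l => !(PySem.Str.startswith l "# ")) lines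
  rw [_h] at this
  simp at this
  omega

-- the body of B's insertion pass
def pvInsStep (d : PySem.Dict String String) (kv : String × List String) :
    PySem.Dict String String :=
  if kv.2 ≠ [] then d.insert kv.1 (PySem.Str.join "\n" kv.2) else d

def split_tool_blocks_py_alt (research : String) : List (String × String) :=
  ((pvSegments "_default" (PySem.Str.splitlines research)).foldl pvInsStep
    (PySem.Dict.empty : PySem.Dict String String)).items

-- ===== PRECONDITION & SPEC =====
def Spec_split_tool_blocks_py (research : String) (out : List (String × String)) : Prop := out = split_tool_blocks_py_alt research
instance (research : String) (out : List (String × String)) : Decidable (Spec_split_tool_blocks_py research out) := by unfold Spec_split_tool_blocks_py; infer_instance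

-- ===== CLAIM (what is proved, stated in full; the proofs are below) =====
def Claim_equal_split_tool_blocks_py : Prop := ∀ (research : String), Dom_split_tool_blocks_py research → Spec_split_tool_blocks_py research (split_tool_blocks_py research)

-- ===== LEMMAS AND PROOFS =====

-- A's loop over header-free lines only accumulates them
theorem pv_foldl_no_header (lines : List String)
    (h : ∀ l ∈ lines, PySem.Str.startswith l "# " = false) :
    ∀ st : PySem.Dict String String × String × List String,
      lines.foldl pvStepA st = (st.1, st.2.1, st.2.2 ++ lines) := by
  induction lines with
  | nil => intro st; simp
  | cons x xs ih =>
      intro st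
      have hx : PySem.Str.startswith x "# " = false := h x (by simp)
      simp only [List.foldl_cons, pvStepA, hx]
      rw [ih (fun l hl => h l (by simp [hl]))]
      simp

-- unfolding pvSegments via the dropWhile split
theorem pvSegments_eq_nil (key : String) (lines : List String)
    (h : lines.dropWhile (fun l => !(PySem.Str.startswith l "# ")) = []) :
    pvSegments key lines = [(key, lines)] := by
  rw [pvSegments]
  split
  · rfl
  · rename_i hd rest h2; rw [h] at h2; cases h2

theorem pvSegments_eq_cons (key : String) (lines : List String) (hd : String)
    (rest : List String)
    (h : lines.dropWhile (fun l => !(PySem.Str.startswith l "# ")) = hd :: rest) :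
    pvSegments key lines =
      (key, lines.takeWhile (fun l => !(PySem.Str.startswith l "# "))) ::
        pvSegments (PySem.Str.lower (PySem.Str.strip (PySem.Str.slice hd (some 2) none))) rest := by
  rw [pvSegments]
  split
  · rename_i h2; rw [h] at h2; cases h2
  · rename_i hd' rest' h2
    rw [h] at h2
    cases h2
    rfl

-- the loop invariant: flushing A's fold equals B's insertion pass over the segments of acc ++ lines
theorem pv_main : ∀ (n : Nat) (lines : List String), lines.length ≤ n →
    ∀ (t : String) (acc : List String) (d : PySem.Dict String String),
      (∀ l ∈ acc, PySem.Str.startswith l "# " = false) →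
      (let st := lines.foldl pvStepA (d, t, acc)
       (if st.2.2 ≠ [] then st.1.insert st.2.1 (PySem.Str.join "\n" st.2.2) else st.1)) =
      (pvSegments t (acc ++ lines)).foldl pvInsStep d := by
  intro n
  induction n with
  | zero =>
      intro lines hlen t acc d hacc
      have : lines = [] := List.length_eq_zero_iff.mp (Nat.le_zero.mp hlen)
      subst this
      have hnil : (acc ++ ([] : List String)).dropWhile
          (fun l => !(PySem.Str.startswith l "# ")) = [] := by
        rw [List.dropWhile_eq_nil_iff]
        intro x hx
        simp only [List.append_nil] at hx
        simp only [hacc x hx, Bool.not_false]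
      rw [pvSegments_eq_nil _ _ hnil]
      simp [pvInsStep]
  | succ n ih =>
      intro lines hlen t acc d hacc
      set p : String → Bool := fun l => !(PySem.Str.startswith l "# ") with hp
      cases hdw : lines.dropWhile p with
      | nil =>
          -- no header in lines
          have hnoh : ∀ l ∈ lines, PySem.Str.startswith l "# " = false := by
            intro l hl
            have := (List.dropWhile_eq_nil_iff.mp hdw) l hl
            simpa [hp] using this
          have hnil : (acc ++ lines).dropWhile p = [] := by
            rw [List.dropWhile_eq_nil_iff]
            intro x hx
            rcases List.mem_append.mp hx with h1 | h1
            · simp only [hp, hacc x h1, Bool.not_false]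
            · simp only [hp, hnoh x h1, Bool.not_false]
          rw [pvSegments_eq_nil _ _ hnil]
          rw [pv_foldl_no_header lines hnoh]
          simp [pvInsStep]
      | cons hd rest =>
          -- lines = pre ++ hd :: rest with pre header-free, hd a header
          have hsplit : lines.takeWhile p ++ hd :: rest = lines := by
            conv_rhs => rw [← List.takeWhile_append_dropWhile (p := p) (l := lines)]
            rw [hdw]
          have hhd : PySem.Str.startswith hd "# " = true := by
            have h2 : lines.dropWhile p ≠ [] := by simp [hdw]
            have h3 := List.head_dropWhile_not p h2
            have h4 : (lines.dropWhile p).head h2 = hd := by simp [hdw]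
            rw [h4] at h3
            simpa [hp] using h3
          have hpre : ∀ l ∈ lines.takeWhile p, PySem.Str.startswith l "# " = false := by
            intro l hl
            have := List.mem_takeWhile_imp hl
            simpa [hp] using this
          have hrest : rest.length ≤ n := by
            have h1 : (lines.takeWhile p ++ hd :: rest).length = lines.length := by
              rw [hsplit]
            simp [List.length_append] at h1
            omega
          -- LHS
          conv_lhs => rw [← hsplit]
          rw [List.foldl_append]
          rw [pv_foldl_no_header (lines.takeWhile p) hpre]
          simp only [List.foldl_cons, pvStepA, hhd, if_true]
          have lhs_eq := ih rest hrest
            (PySem.Str.lower (PySem.Str.strip (PySem.Str.slice hd (some 2) none)))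
            []
            (if acc ++ lines.takeWhile p ≠ [] then
              d.insert t (PySem.Str.join "\n" (acc ++ lines.takeWhile p)) else d)
            (by intro l hl; cases hl)
          simp only [List.nil_append] at lhs_eq
          rw [lhs_eq]
          -- RHS
          have hdwa : (acc ++ lines).dropWhile p = hd :: rest := by
            rw [List.dropWhile_append]
            have hda : acc.dropWhile p = [] := by
              rw [List.dropWhile_eq_nil_iff]
              intro x hx
              simp only [hp, hacc x hx, Bool.not_false]
            rw [hda]
            simpa using hdw
          have htwa : (acc ++ lines).takeWhile p = acc ++ lines.takeWhile p := by
            rw [List.takeWhile_append_of_pos]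
            intro x hx
            simp only [hp, hacc x hx, Bool.not_false]
          rw [pvSegments_eq_cons _ _ _ _ hdwa, htwa]
          simp only [List.foldl_cons, pvInsStep]

-- ===== VERDICT (by name: the statement is the Claim_ definition above) =====
theorem split_tool_blocks_py_spec : Claim_equal_split_tool_blocks_py := by
  intro research _
  unfold Spec_split_tool_blocks_py split_tool_blocks_py split_tool_blocks_py_alt
  have := pv_main (PySem.Str.splitlines research).length (PySem.Str.splitlines research)
    (le_refl _) "_default" [] PySem.Dict.empty (by intro l hl; cases hl)
  simp only [List.nil_append] at this
  exact congrArg PySem.Dict.items this
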